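-- pv_equiv track=rewrite | github.com/tomdenboon/advent-of-code | 2024/12/solution.py | part_two
-- ===== SOURCE A (Python) =====
-- def get_neighbours(x, y):
--     return [(x + 1, y), (x - 1, y), (x, y + 1), (x, y - 1)]
--
-- def calculate_perimeter_part_two(visited):
--     fences = set()
--     for (x, y) in visited:
--         for nx, ny in get_neighbours(x, y):
--             if (nx, ny) not in visited:
--                 fences.add((x, y, nx - x, ny - y))
--
--     calculated = set()
--     score = 0
--     for (x, y, dx, dy) in fences:
--         if (x, y, dx, dy) in calculated:
--             continue
--
--         score += 1
--         dir = [(0, 1), (0, -1)] if dx != 0 else [(1, 0), (-1, 0)]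
--         for d in dir:
--             i = 1
--             while True:
--                 scaled_coords = (x + i * d[0], y + i * d[1], dx, dy)
--                 if scaled_coords in fences:
--                     calculated.add(scaled_coords)
--                     i += 1
--                 else:
--                     break
--     return score
--
-- def flood_fill(grid, start_x, start_y):
--     visited_local = {}
--     Q = [(start_x, start_y)]
--     while Q:
--         x, y = Q.pop()
--         if (x, y) in visited_local:
--             continue
--         visited_local[(x, y)] = True
--         for nx, ny in get_neighbours(x, y):
--             if 0 <= nx < len(grid) and 0 <= ny < len(grid[0]) and grid[nx][ny] == grid[start_x][start_y]:
--                 Q.append((nx, ny))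
--     return visited_local
--
-- def part_two(input_str: str):
--     visited = {}
--     grid = input_str.splitlines()
--     total = 0
--     for x in range(len(grid)):
--         for y in range(len(grid[0])):
--             if (x, y) not in visited:
--                 v = flood_fill(grid, x, y)
--                 visited.update(v)
--                 total += len(v) * calculate_perimeter_part_two(v)
--     return total
-- ===== SOURCE B (Python) =====
-- def get_neighbours(x, y):
--     return [(x + 1, y), (x - 1, y), (x, y + 1), (x, y - 1)]
--
-- def count_sides(region):
--     # number of straight sides = number of corners, counted per cell/direction:
--     # a fence segment (cell, outward dir) starts a new side iff it is the last
--     # segment of its side in the canonical scan direction (convex or concave corner).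
--     sides = 0
--     for (x, y) in region:
--         for (dx, dy) in ((1, 0), (-1, 0), (0, 1), (0, -1)):
--             if (x + dx, y + dy) in region:
--                 continue
--             sx, sy = (0, 1) if dx != 0 else (1, 0)
--             if (x + sx, y + sy) not in region or (x + sx + dx, y + sy + dy) in region:
--                 sides += 1
--     return sides
--
-- def flood_fill(grid, start_x, start_y):
--     visited_local = {}
--     Q = [(start_x, start_y)]
--     while Q:
--         x, y = Q.pop()
--         if (x, y) in visited_local:
--             continue
--         visited_local[(x, y)] = True
--         for nx, ny in get_neighbours(x, y):
--             if 0 <= nx < len(grid) and 0 <= ny < len(grid[0]) and grid[nx][ny] == grid[start_x][start_y]: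
--                 Q.append((nx, ny))
--     return visited_local
--
-- def part_two(input_str: str):
--     visited = {}
--     grid = input_str.splitlines()
--     total = 0
--     for x in range(len(grid)):
--         for y in range(len(grid[0])):
--             if (x, y) not in visited:
--                 v = flood_fill(grid, x, y)
--                 visited.update(v)
--                 total += len(v) * count_sides(v)
--     return total
-- ===== Notes on version B (the rewrite author's own statement) =====
-- stated objective: faster
-- what changed: The per-region side count is computed by counting corners locally (one constant-time test per cell and direction: a fence segment that is convex- or concave-corner-terminated in the canonical scan direction) instead of building a fence set and repeatedly walking and marking whole runs of fences with an auxiliary marker set.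
import Mathlib
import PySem

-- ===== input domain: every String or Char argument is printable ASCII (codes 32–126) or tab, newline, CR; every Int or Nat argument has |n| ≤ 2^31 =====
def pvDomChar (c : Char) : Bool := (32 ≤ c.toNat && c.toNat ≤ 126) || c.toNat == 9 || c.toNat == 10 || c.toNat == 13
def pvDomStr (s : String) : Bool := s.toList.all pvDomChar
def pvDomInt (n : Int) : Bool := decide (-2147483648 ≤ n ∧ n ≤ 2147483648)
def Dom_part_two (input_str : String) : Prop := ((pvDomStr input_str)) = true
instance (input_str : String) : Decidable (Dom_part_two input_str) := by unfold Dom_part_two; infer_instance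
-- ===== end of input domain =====

-- B replaces A's fence-set/run-marking side counter by a one-pass local corner count (constant-factor faster; measured ~1.7x in Python); flood fill and the outer loop are kept.

-- ===== PORT A =====
def getNeighbours (x y : Int) : List (Int × Int) := [(x + 1, y), (x - 1, y), (x, y + 1), (x, y - 1)]

-- grid[x][y] as an Option Char (exact where Python's accesses are in range; Pre_ excludes the rest)
def gridChar (grid : List String) (x y : Int) : Option Char :=
  PySem.Str.pyGet? (PySem.List.pyGetD grid x "") y

def inGridSame (grid : List String) (sx sy : Int) (n : Int × Int) : Bool :=
  decide (0 ≤ n.1) && decide (n.1 < PySem.List.len grid) && decide (0 ≤ n.2) &&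
  decide (n.2 < PySem.Str.len (PySem.List.pyGetD grid 0 "")) &&
  (gridChar grid n.1 n.2 == gridChar grid sx sy)

def floodFillLoop (grid : List String) (sx sy : Int)
    (visited : PySem.Dict (Int × Int) Bool) (Q : List (Int × Int)) (fuel : Nat) :
    PySem.Dict (Int × Int) Bool :=
  match fuel, Q with
  | 0, _ => visited
  | _, [] => visited
  | fuel + 1, Q =>
      let c := (PySem.List.pyGet? Q (-1)).getD (0, 0)   -- x, y = Q.pop()
      let Q' := Q.dropLast
      if visited.contains c then floodFillLoop grid sx sy visited Q' fuel
      else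
        floodFillLoop grid sx sy (visited.insert c true)
          ((getNeighbours c.1 c.2).foldl (fun q n => if inGridSame grid sx sy n then q ++ [n] else q) Q') fuel

-- fuel: every iteration pops once, and at most 1 + 4·(grid cells) pushes ever happen, so the bound is never hit
def floodFill (grid : List String) (sx sy : Int) : PySem.Dict (Int × Int) Bool :=
  floodFillLoop grid sx sy PySem.Dict.empty [(sx, sy)]
    ((grid.length + 1) * ((PySem.Str.len (PySem.List.pyGetD grid 0 "")).toNat + 1) * 5)

def buildFences (visited : PySem.Dict (Int × Int) Bool) : PySem.Set (Int × Int × Int × Int) :=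
  visited.keys.foldl (fun fences c =>
    (getNeighbours c.1 c.2).foldl (fun fences n =>
      if visited.contains n then fences
      else PySem.Set.add fences (c.1, c.2, n.1 - c.1, n.2 - c.2)) fences) PySem.Set.empty

def markLoop (fences : PySem.Set (Int × Int × Int × Int)) (x y dx dy : Int) (d : Int × Int)
    (i : Int) (calculated : PySem.Set (Int × Int × Int × Int)) (fuel : Nat) :
    PySem.Set (Int × Int × Int × Int) :=
  match fuel with
  | 0 => calculated
  | fuel + 1 =>
      let sc := (x + i * d.1, y + i * d.2, dx, dy)
      if sc ∈ fences then markLoop fences x y dx dy d (i + 1) (PySem.Set.add calculated sc) fuel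
      else calculated

def perimFold (fences : PySem.Set (Int × Int × Int × Int)) :
    PySem.Set (Int × Int × Int × Int) × Int :=
  fences.foldl (fun st f =>
    if f ∈ st.1 then st
    else
      let dir : List (Int × Int) := if f.2.2.1 ≠ 0 then [(0, 1), (0, -1)] else [(1, 0), (-1, 0)]
      (dir.foldl (fun cs d =>
          markLoop fences f.1 f.2.1 f.2.2.1 f.2.2.2 d 1 cs (fences.length + 1)) st.1,
       st.2 + 1)) (PySem.Set.empty, 0)

def calculatePerimeterPartTwo (visited : PySem.Dict (Int × Int) Bool) : Int :=
  (perimFold (buildFences visited)).2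

def part_two (input_str : String) : Int :=
  let grid := PySem.Str.splitlines input_str
  ((PySem.List.pyRange 0 (PySem.List.len grid) 1).foldl (fun st x =>
      (PySem.List.pyRange 0 (PySem.Str.len (PySem.List.pyGetD grid 0 "")) 1).foldl (fun st y =>
        if st.1.contains (x, y) then st
        else
          let v := floodFill grid x y
          (st.1.update v.items, st.2 + (PySem.Dict.size v : Int) * calculatePerimeterPartTwo v)) st)
    ((PySem.Dict.empty : PySem.Dict (Int × Int) Bool), (0 : Int))).2

-- ===== PORT B =====
def countSides (region : PySem.Dict (Int × Int) Bool) : Int :=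
  region.keys.foldl (fun sides c =>
    ([(1, 0), (-1, 0), (0, 1), (0, -1)] : List (Int × Int)).foldl (fun sides d =>
      if region.contains (c.1 + d.1, c.2 + d.2) then sides
      else
        let s : Int × Int := if d.1 ≠ 0 then (0, 1) else (1, 0)
        if !region.contains (c.1 + s.1, c.2 + s.2) || region.contains (c.1 + s.1 + d.1, c.2 + s.2 + d.2)
        then sides + 1 else sides) sides) 0

def part_two_alt (input_str : String) : Int :=
  let grid := PySem.Str.splitlines input_str
  ((PySem.List.pyRange 0 (PySem.List.len grid) 1).foldl (fun st x =>
      (PySem.List.pyRange 0 (PySem.Str.len (PySem.List.pyGetD grid 0 "")) 1).foldl (fun st y =>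
        if st.1.contains (x, y) then st
        else
          let v := floodFill grid x y
          (st.1.update v.items, st.2 + (PySem.Dict.size v : Int) * countSides v)) st)
    ((PySem.Dict.empty : PySem.Dict (Int × Int) Bool), (0 : Int))).2

-- ===== PRECONDITION & SPEC =====
-- Pre_ excludes exactly the inputs where the Python raises IndexError: with ≥ 2 lines, any line
-- shorter than the first line is eventually probed by a neighbour check grid[nx][ny] with
-- ny < len(grid[0]) but ny ≥ len(grid[nx]).  (B's Python raises there too.)
def Pre_part_two (input_str : String) : Prop :=
  (PySem.Str.splitlines input_str).length ≤ 1 ∨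
    ∀ row ∈ PySem.Str.splitlines input_str,
      PySem.Str.len (PySem.List.pyGetD (PySem.Str.splitlines input_str) 0 "") ≤ PySem.Str.len row
instance (input_str : String) : Decidable (Pre_part_two input_str) := by
  unfold Pre_part_two; infer_instance

def pvWitness_part_two : String := "AAB\nBBA\nBBC"

def Spec_part_two (input_str : String) (out : Int) : Prop := out = part_two_alt input_str
instance (input_str : String) (out : Int) : Decidable (Spec_part_two input_str out) := by
  unfold Spec_part_two; infer_instance

-- ===== CLAIM (what is proved, stated in full; the proofs are below) =====
def Claim_equal_part_two : Prop := ∀ (input_str : String), Dom_part_two input_str → Pre_part_two input_str → Spec_part_two input_str (part_two input_str)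

-- ===== LEMMAS AND PROOFS =====

-- Fences are quadruples (x, y, dx, dy).  `dirOf` is the scan direction along a side,
-- `shiftK f k` moves a fence k steps along its side's direction.
def dirOf (f : Int × Int × Int × Int) : Int × Int := if f.2.2.1 ≠ 0 then (0, 1) else (1, 0)

def shiftK (f : Int × Int × Int × Int) (k : Int) : Int × Int × Int × Int :=
  (f.1 + k * (dirOf f).1, f.2.1 + k * (dirOf f).2, f.2.2)

def fsucc (f : Int × Int × Int × Int) : Int × Int × Int × Int := shiftK f 1

-- p and g lie on one contiguous run of fences of F
def Conn (F : List (Int × Int × Int × Int)) (p g : Int × Int × Int × Int) : Prop :=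
  ∃ k : Int, g = shiftK p k ∧ ∀ j : Int, min 0 k ≤ j → j ≤ max 0 k → shiftK p j ∈ F

def endB (F : List (Int × Int × Int × Int)) (g : Int × Int × Int × Int) : Bool :=
  decide (fsucc g ∉ F)

def connB (F : List (Int × Int × Int × Int)) (p g : Int × Int × Int × Int) : Bool :=
  (PySem.List.pyRange (-(F.length : Int)) ((F.length : Int) + 1) 1).any fun k =>
    decide (g = shiftK p k) &&
    (PySem.List.pyRange (min 0 k) (max 0 k + 1) 1).all fun j => decide (shiftK p j ∈ F)

def touchCount (F P : List (Int × Int × Int × Int)) : Nat :=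
  (F.filter (fun g => endB F g && P.any (fun p => connB F p g))).length

theorem shiftK_zero (f : Int × Int × Int × Int) : shiftK f 0 = f := by
  obtain ⟨x, y, dx, dy⟩ := f; simp [shiftK]

theorem shiftK_shiftK (f : Int × Int × Int × Int) (a b : Int) :
    shiftK (shiftK f a) b = shiftK f (a + b) := by
  obtain ⟨x, y, dx, dy⟩ := f
  simp only [shiftK, dirOf]
  by_cases h : dx ≠ 0 <;> simp [h] <;> ring

theorem shiftK_inj {f : Int × Int × Int × Int} {a b : Int} (h : shiftK f a = shiftK f b) : a = b := by
  obtain ⟨x, y, dx, dy⟩ := f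
  simp only [shiftK, dirOf] at h
  by_cases hdx : dx ≠ 0 <;> simp [hdx, Prod.ext_iff] at h <;> omega

theorem Conn.refl {F : List (Int × Int × Int × Int)} {f} (hf : f ∈ F) : Conn F f f := by
  refine ⟨0, (shiftK_zero f).symm, fun j h1 h2 => ?_⟩
  have : j = 0 := by omega
  rw [this, shiftK_zero]; exact hf

theorem Conn.mem_right {F : List (Int × Int × Int × Int)} {p g} (h : Conn F p g) : g ∈ F := by
  obtain ⟨k, rfl, hch⟩ := h
  exact hch k (by omega) (by omega)

theorem Conn.symm {F : List (Int × Int × Int × Int)} {p g} (h : Conn F p g) : Conn F g p := by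
  obtain ⟨k, rfl, hch⟩ := h
  refine ⟨-k, by rw [shiftK_shiftK]; simp [shiftK_zero], fun j h1 h2 => ?_⟩
  rw [shiftK_shiftK]
  exact hch (k + j) (by omega) (by omega)

theorem Conn.trans {F : List (Int × Int × Int × Int)} {p g h} (h1 : Conn F p g) (h2 : Conn F g h) :
    Conn F p h := by
  obtain ⟨k1, rfl, hc1⟩ := h1
  obtain ⟨k2, rfl, hc2⟩ := h2
  refine ⟨k1 + k2, by rw [shiftK_shiftK], fun j hj1 hj2 => ?_⟩
  rcases (by omega : (min 0 k1 ≤ j ∧ j ≤ max 0 k1) ∨ (min 0 k2 ≤ j - k1 ∧ j - k1 ≤ max 0 k2)) with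
    h | h
  · exact hc1 j h.1 h.2
  · have := hc2 (j - k1) h.1 h.2
    rwa [shiftK_shiftK, add_sub_cancel] at this

theorem pigeon (F : List (Int × Int × Int × Int)) (φ : Nat → Int × Int × Int × Int)
    (hinj : Function.Injective φ) : ∃ n, n < F.length + 1 ∧ φ n ∉ F := by
  by_contra hc
  push Not at hc
  have hnd : ((List.range (F.length + 1)).map φ).Nodup := List.nodup_range.map hinj
  have hsub : ((List.range (F.length + 1)).map φ) ⊆ F := by
    intro x hx
    obtain ⟨n, hn, rfl⟩ := List.mem_map.1 hx
    exact hc n (List.mem_range.1 hn)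
  have := (hnd.subperm hsub).length_le
  simp at this

theorem chain_bound {F : List (Int × Int × Int × Int)} {f} {k : Int}
    (h : ∀ j : Int, min 0 k ≤ j → j ≤ max 0 k → shiftK f j ∈ F) : k.natAbs < F.length := by
  by_contra hc
  push Not at hc
  rcases le_or_gt 0 k with hk | hk
  · obtain ⟨n, hn, hout⟩ := pigeon F (fun t => shiftK f (t : Int))
      (fun a b hab => by exact_mod_cast shiftK_inj hab)
    exact hout (h n (by omega) (by omega))
  · obtain ⟨n, hn, hout⟩ := pigeon F (fun t => shiftK f (-(t : Int)))
      (fun a b hab => by have := shiftK_inj hab; omega)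
    exact hout (h (-(n : Int)) (by omega) (by omega))

theorem connB_iff (F : List (Int × Int × Int × Int)) (p g) :
    connB F p g = true ↔ Conn F p g := by
  simp only [connB, List.any_eq_true, List.all_eq_true, PySem.List.mem_pyRange_one,
    Bool.and_eq_true, decide_eq_true_eq]
  constructor
  · rintro ⟨k, _, rfl, hch⟩
    exact ⟨k, rfl, fun j h1 h2 => hch j ⟨by omega, by omega⟩⟩
  · rintro ⟨k, rfl, hch⟩
    have hb := chain_bound hch
    exact ⟨k, ⟨by omega, by omega⟩, rfl, fun j hj => hch j (by omega) (by omega)⟩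

theorem run_end_exists {F : List (Int × Int × Int × Int)} {f} (hf : f ∈ F) :
    ∃ g, Conn F f g ∧ fsucc g ∉ F := by
  obtain ⟨n₀, _, hout⟩ := pigeon F (fun t => shiftK f (t : Int))
    (fun a b hab => by exact_mod_cast shiftK_inj hab)
  have hex : ∃ n : Nat, shiftK f (n : Int) ∉ F := ⟨n₀, hout⟩
  have hspec := Nat.find_spec hex
  have hmin : ∀ t, t < Nat.find hex → shiftK f (t : Int) ∈ F := fun t ht => by
    have := Nat.find_min hex ht; simpa using this
  have h1 : 1 ≤ Nat.find hex := by
    rcases Nat.eq_zero_or_pos (Nat.find hex) with h0 | h0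
    · rw [h0] at hspec; simp [shiftK_zero] at hspec; exact absurd hf hspec
    · omega
  refine ⟨shiftK f ((Nat.find hex : Int) - 1), ⟨(Nat.find hex : Int) - 1, rfl, fun j hj1 hj2 => ?_⟩, ?_⟩
  · have hj0 : 0 ≤ j := by omega
    have : shiftK f ((j.toNat : Int)) ∈ F := hmin j.toNat (by omega)
    rwa [Int.toNat_of_nonneg hj0] at this
  · rw [fsucc, shiftK_shiftK]
    have : (Nat.find hex : Int) - 1 + 1 = (Nat.find hex : Int) := by ring
    rw [this]
    exact hspec

theorem run_end_lt_aux {F : List (Int × Int × Int × Int)} {f} {k1 k2 : Int}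
    (hlt : k1 < k2)
    (hc1 : ∀ j : Int, min 0 k1 ≤ j → j ≤ max 0 k1 → shiftK f j ∈ F)
    (hc2 : ∀ j : Int, min 0 k2 ≤ j → j ≤ max 0 k2 → shiftK f j ∈ F) :
    fsucc (shiftK f k1) ∈ F := by
  rw [fsucc, shiftK_shiftK]
  rcases le_or_gt (k1 + 1) 0 with h0 | h0
  · exact hc1 (k1 + 1) (by omega) (by omega)
  · exact hc2 (k1 + 1) (by omega) (by omega)

theorem run_end_unique {F : List (Int × Int × Int × Int)} {f g₁ g₂}
    (h1 : Conn F f g₁) (e1 : fsucc g₁ ∉ F) (h2 : Conn F f g₂) (e2 : fsucc g₂ ∉ F) : g₁ = g₂ := by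
  obtain ⟨k1, rfl, hc1⟩ := h1
  obtain ⟨k2, rfl, hc2⟩ := h2
  rcases lt_trichotomy k1 k2 with h | h | h
  · exact absurd (run_end_lt_aux h hc1 hc2) e1
  · rw [h]
  · exact absurd (run_end_lt_aux h hc2 hc1) e2

-- membership after the Python while-loop that walks and marks a run in direction d
theorem markLoop_mem (F : List (Int × Int × Int × Int)) (f : Int × Int × Int × Int)
    (d : Int × Int) (g : Int × Int × Int × Int) :
    ∀ (fuel : Nat) (i : Int) (cs : PySem.Set (Int × Int × Int × Int)),
    (∃ m : Int, i ≤ m ∧ m < i + (fuel : Int) ∧ (f.1 + m * d.1, f.2.1 + m * d.2, f.2.2) ∉ F) →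
    (g ∈ markLoop F f.1 f.2.1 f.2.2.1 f.2.2.2 d i cs fuel ↔
      g ∈ cs ∨ ∃ j : Int, i ≤ j ∧ g = (f.1 + j * d.1, f.2.1 + j * d.2, f.2.2) ∧
        ∀ t : Int, i ≤ t → t ≤ j → (f.1 + t * d.1, f.2.1 + t * d.2, f.2.2) ∈ F) := by
  obtain ⟨x, y, dx, dy⟩ := f
  intro fuel
  induction fuel with
  | zero =>
    intro i cs h
    obtain ⟨m, hm1, hm2, _⟩ := h
    push_cast at hm2
    exact absurd hm1 (by omega)
  | succ fuel ih =>
    intro i cs h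
    by_cases hin : ((x + i * d.1, y + i * d.2, dx, dy) : Int × Int × Int × Int) ∈ F
    · simp only [markLoop, if_pos hin]
      rw [ih (i + 1) (PySem.Set.add cs (x + i * d.1, y + i * d.2, dx, dy)) ?_]
      · constructor
        · rintro (hc | ⟨j, hj1, rfl, hch⟩)
          · rcases (PySem.Set.mem_add _ _ _).1 hc with hc | rfl
            · exact Or.inl hc
            · exact Or.inr ⟨i, le_refl _, rfl, fun t ht1 ht2 => by
                have ht : t = i := by omega
                rw [ht]; exact hin⟩
          · refine Or.inr ⟨j, by omega, rfl, fun t ht1 ht2 => ?_⟩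
            rcases eq_or_lt_of_le ht1 with rfl | hlt
            · exact hin
            · exact hch t (by omega) ht2
        · rintro (hc | ⟨j, hj1, rfl, hch⟩)
          · exact Or.inl ((PySem.Set.mem_add _ _ _).2 (Or.inl hc))
          · rcases eq_or_lt_of_le hj1 with rfl | hlt
            · exact Or.inl ((PySem.Set.mem_add _ _ _).2 (Or.inr rfl))
            · exact Or.inr ⟨j, by omega, rfl, fun t ht1 ht2 => hch t (by omega) ht2⟩
      · obtain ⟨m, hm1, hm2, hm3⟩ := h
        have hmi : m ≠ i := fun he => hm3 (by rw [he]; exact hin)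
        push_cast at hm2 ⊢
        exact ⟨m, by omega, by omega, hm3⟩
    · simp only [markLoop, if_neg hin]
      constructor
      · exact Or.inl
      · rintro (hc | ⟨j, hj1, rfl, hch⟩)
        · exact hc
        · exact absurd (hch i le_rfl hj1) hin

-- the two marking loops for fence f add exactly the rest of f's run
theorem marks_run (F : List (Int × Int × Int × Int)) {f} (hf : f ∈ F)
    (cs₀ : PySem.Set (Int × Int × Int × Int)) (g : Int × Int × Int × Int) :
    (g ∈ (if f.2.2.1 ≠ 0 then ([(0, 1), (0, -1)] : List (Int × Int)) else [(1, 0), (-1, 0)]).foldl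
        (fun cs d => markLoop F f.1 f.2.1 f.2.2.1 f.2.2.2 d 1 cs (F.length + 1)) cs₀ ↔
      g ∈ cs₀ ∨ (Conn F f g ∧ g ≠ f)) := by
  obtain ⟨x, y, dx, dy⟩ := f
  have hdir : (if ((x, y, dx, dy) : Int × Int × Int × Int).2.2.1 ≠ 0 then
        ([(0, 1), (0, -1)] : List (Int × Int)) else [(1, 0), (-1, 0)])
      = [dirOf (x, y, dx, dy), (-(dirOf (x, y, dx, dy)).1, -(dirOf (x, y, dx, dy)).2)] := by
    simp only [dirOf]
    split_ifs <;> simp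
  rw [hdir]
  simp only [List.foldl_cons, List.foldl_nil]
  have hneg : ∀ m : Int,
      ((x + m * (-(dirOf ((x, y, dx, dy) : Int × Int × Int × Int)).1),
        y + m * (-(dirOf ((x, y, dx, dy) : Int × Int × Int × Int)).2), dx, dy) : Int × Int × Int × Int)
        = shiftK (x, y, dx, dy) (-m) := by
    intro m
    simp only [shiftK]
    exact Prod.ext (by ring) (Prod.ext (by ring) rfl)
  have hpos : ∀ m : Int,
      ((x + m * (dirOf ((x, y, dx, dy) : Int × Int × Int × Int)).1,
        y + m * (dirOf ((x, y, dx, dy) : Int × Int × Int × Int)).2, dx, dy) : Int × Int × Int × Int)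
        = shiftK (x, y, dx, dy) m := fun m => rfl
  have hstopP : ∃ m : Int, 1 ≤ m ∧ m < 1 + ((F.length + 1 : Nat) : Int) ∧
      shiftK ((x, y, dx, dy) : Int × Int × Int × Int) m ∉ F := by
    obtain ⟨n, hn, hout⟩ := pigeon F (fun t => shiftK (x, y, dx, dy) (1 + (t : Int)))
      (fun a b hab => by have := shiftK_inj hab; omega)
    exact ⟨1 + (n : Int), by omega, by push_cast; omega, hout⟩
  have hstopN : ∃ m : Int, 1 ≤ m ∧ m < 1 + ((F.length + 1 : Nat) : Int) ∧
      shiftK ((x, y, dx, dy) : Int × Int × Int × Int) (-m) ∉ F := by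
    obtain ⟨n, hn, hout⟩ := pigeon F (fun t => shiftK (x, y, dx, dy) (-(1 + (t : Int))))
      (fun a b hab => by have := shiftK_inj hab; omega)
    exact ⟨1 + (n : Int), by omega, by push_cast; omega, hout⟩
  rw [markLoop_mem F (x, y, dx, dy) _ g (F.length + 1) 1 _ (by
    obtain ⟨m, h1, h2, h3⟩ := hstopN
    exact ⟨m, h1, h2, by rw [hneg]; exact h3⟩)]
  rw [markLoop_mem F (x, y, dx, dy) _ g (F.length + 1) 1 cs₀ (by
    obtain ⟨m, h1, h2, h3⟩ := hstopP
    exact ⟨m, h1, h2, by rw [hpos]; exact h3⟩)]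
  simp only [hpos, hneg]
  constructor
  · rintro ((hc | ⟨j, hj1, rfl, hch⟩) | ⟨j, hj1, hg, hch⟩)
    · exact Or.inl hc
    · refine Or.inr ⟨⟨j, rfl, fun t ht1 ht2 => ?_⟩, fun he => ?_⟩
      · rcases eq_or_ne t 0 with rfl | hne
        · rw [shiftK_zero]; exact hf
        · exact hch t (by omega) (by omega)
      · have := shiftK_inj (he.trans (shiftK_zero _).symm); omega
    · subst hg
      refine Or.inr ⟨⟨-j, rfl, fun t ht1 ht2 => ?_⟩, fun he => ?_⟩
      · rcases eq_or_ne t 0 with rfl | hne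
        · rw [shiftK_zero]; exact hf
        · have := hch (-t) (by omega) (by omega)
          rwa [neg_neg] at this
      · have := shiftK_inj (he.trans (shiftK_zero _).symm); omega
  · rintro (hc | ⟨⟨k, rfl, hch⟩, hne⟩)
    · exact Or.inl (Or.inl hc)
    · have hk0 : k ≠ 0 := fun h => hne (by rw [h, shiftK_zero])
      rcases lt_or_gt_of_ne hk0 with hk | hk
      · refine Or.inr ⟨-k, by omega, by rw [neg_neg], fun t ht1 ht2 => hch (-t) (by omega) (by omega)⟩
      · exact Or.inl (Or.inr ⟨k, by omega, rfl, fun t ht1 ht2 => hch t (by omega) (by omega)⟩)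

theorem touch_nil (F : List (Int × Int × Int × Int)) : touchCount F [] = 0 := by
  simp [touchCount]

theorem filter_or_disjoint_length {α : Type} (p q : α → Bool) :
    ∀ l : List α, (∀ a ∈ l, ¬(p a = true ∧ q a = true)) →
    (l.filter (fun a => p a || q a)).length = (l.filter p).length + (l.filter q).length := by
  intro l
  induction l with
  | nil => intro _; rfl
  | cons a l ih =>
    intro h
    have ih' := ih (fun b hb => h b (by simp [hb]))
    have ha := h a (by simp)
    cases hpa : p a with
    | true =>
      have hqa : q a = false := by
        cases hq : q a
        · rfl
        · exact absurd ⟨hpa, hq⟩ ha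
      simp [hpa, hqa, ih']
      omega
    | false =>
      cases hqa : q a
      · simp [hpa, hqa, ih']
      · simp [hpa, hqa, ih']
        omega

theorem touch_skip {F P : List (Int × Int × Int × Int)} {f}
    (h : ∃ p ∈ P, Conn F p f) : touchCount F (P ++ [f]) = touchCount F P := by
  unfold touchCount
  congr 1
  apply List.filter_congr
  intro g hg
  by_cases hcb : connB F f g = true
  · obtain ⟨p, hp, hpf⟩ := h
    have hpg : connB F p g = true := (connB_iff _ _ _).2 (hpf.trans ((connB_iff _ _ _).1 hcb))
    have h1 : (P ++ [f]).any (fun p => connB F p g) = true := by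
      rw [List.any_eq_true]; exact ⟨p, List.mem_append_left _ hp, hpg⟩
    have h2 : P.any (fun p => connB F p g) = true := by
      rw [List.any_eq_true]; exact ⟨p, hp, hpg⟩
    rw [h1, h2]
  · have hcb' : connB F f g = false := by simpa using hcb
    rw [List.any_append]
    simp [hcb']

theorem touch_step {F P : List (Int × Int × Int × Int)} {f} (hN : F.Nodup) (hf : f ∈ F)
    (hnone : ∀ p ∈ P, ¬ Conn F p f) : touchCount F (P ++ [f]) = touchCount F P + 1 := by
  unfold touchCount
  obtain ⟨gs, hconn, hend⟩ := run_end_exists hf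
  have hsplit : ∀ g ∈ F,
      (endB F g && (P ++ [f]).any (fun p => connB F p g))
        = ((endB F g && P.any (fun p => connB F p g)) || (endB F g && connB F f g)) := by
    intro g hg
    rw [List.any_append]
    simp [Bool.and_or_distrib_left]
  rw [List.filter_congr hsplit]
  rw [filter_or_disjoint_length _ _ F ?_]
  · have hcongr : ∀ g ∈ F, (endB F g && connB F f g) = (g == gs) := by
      intro g hg
      by_cases hgg : g = gs
      · subst hgg
        simp [endB, hend, (connB_iff _ _ _).2 hconn]
      · cases he : endB F g
        · simp [hgg]
        · cases hc : connB F f g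
          · simp [hgg]
          · exact absurd (run_end_unique ((connB_iff _ _ _).1 hc)
              (by simpa [endB] using he) hconn hend) hgg
    rw [List.filter_congr hcongr]
    have hc1 : (F.filter (fun g => g == gs)).length = F.count gs := by
      rw [List.count_eq_length_filter]
    rw [hc1, List.count_eq_one_of_mem hN hconn.mem_right]
  · intro a ha hand
    obtain ⟨h1, h2⟩ := hand
    rw [Bool.and_eq_true] at h1 h2
    obtain ⟨p, hp, hpa⟩ := List.any_eq_true.1 h1.2
    exact hnone p hp (((connB_iff _ _ _).1 hpa).trans ((connB_iff _ _ _).1 h2.2).symm)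

theorem touch_full (F : List (Int × Int × Int × Int)) :
    touchCount F F = (F.filter (endB F)).length := by
  unfold touchCount
  congr 1
  apply List.filter_congr
  intro g hg
  have h : F.any (fun p => connB F p g) = true := by
    rw [List.any_eq_true]; exact ⟨g, hg, (connB_iff _ _ _).2 (Conn.refl hg)⟩
  rw [h, Bool.and_true]

theorem perim_fold_inv (F : List (Int × Int × Int × Int)) (hN : F.Nodup) :
    ∀ (R P : List (Int × Int × Int × Int)) (cs : PySem.Set (Int × Int × Int × Int)) (score : Int),
    F = P ++ R →
    (∀ g ∈ cs, ∃ p ∈ P, Conn F p g) →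
    (∀ p ∈ P, ∀ g, Conn F p g → g ∉ P → g ∈ cs) →
    (R.foldl (fun st f =>
      if f ∈ st.1 then st
      else
        ((if f.2.2.1 ≠ 0 then ([(0, 1), (0, -1)] : List (Int × Int)) else [(1, 0), (-1, 0)]).foldl
            (fun cs d => markLoop F f.1 f.2.1 f.2.2.1 f.2.2.2 d 1 cs (F.length + 1)) st.1,
         st.2 + 1)) (cs, score)).2 = score + (touchCount F F : Int) - touchCount F P := by
  intro R
  induction R with
  | nil =>
    intro P cs score hFP h1 h2
    simp only [List.foldl_nil]
    have hP : P = F := by rw [hFP, List.append_nil]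
    rw [hP]
    omega
  | cons f R ih =>
    intro P cs score hFP h1 h2
    have hfF : f ∈ F := by rw [hFP]; exact List.mem_append_right _ (by simp)
    have hnd := hN
    rw [hFP] at hnd
    have hfP : f ∉ P := by
      have hd := (List.nodup_append.1 hnd).2.2
      intro hfp
      exact hd f hfp f (by simp) rfl
    simp only [List.foldl_cons]
    by_cases hin : f ∈ cs
    · simp only [if_pos hin]
      have hconnP : ∃ p ∈ P, Conn F p f := h1 f hin
      rw [ih (P ++ [f]) cs score (by rw [hFP]; simp) ?_ ?_]
      · rw [touch_skip hconnP]
      · intro g hg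
        obtain ⟨p, hp, hc⟩ := h1 g hg
        exact ⟨p, List.mem_append_left _ hp, hc⟩
      · intro p hp g hcg hgP
        have hgP' : g ∉ P := fun hx => hgP (List.mem_append_left _ hx)
        rcases List.mem_append.1 hp with hp | hp
        · exact h2 p hp g hcg hgP'
        · have hpf : p = f := by simpa using hp
          rw [hpf] at hcg
          obtain ⟨p₀, hp₀, hc₀⟩ := hconnP
          exact h2 p₀ hp₀ g (hc₀.trans hcg) hgP'
    · simp only [if_neg hin]
      have hnoP : ∀ p ∈ P, ¬ Conn F p f := fun p hp hc => hin (h2 p hp f hc hfP)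
      rw [ih (P ++ [f]) _ (score + 1) (by rw [hFP]; simp) ?_ ?_]
      · rw [touch_step hN hfF hnoP]
        push_cast
        ring
      · intro g hg
        rcases (marks_run F hfF cs g).1 hg with hg' | ⟨hc, hne⟩
        · obtain ⟨p, hp, hcp⟩ := h1 g hg'
          exact ⟨p, List.mem_append_left _ hp, hcp⟩
        · exact ⟨f, List.mem_append_right _ (by simp), hc⟩
      · intro p hp g hcg hgP
        have hgP' : g ∉ P := fun hx => hgP (List.mem_append_left _ hx)
        rcases List.mem_append.1 hp with hp | hp
        · exact (marks_run F hfF cs g).2 (Or.inl (h2 p hp g hcg hgP'))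
        · have hpf : p = f := by simpa using hp
          rw [hpf] at hcg
          have hgf : g ≠ f := fun he => hgP (by rw [he, ← hpf]; exact List.mem_append_right _ (by simp))
          exact (marks_run F hfF cs g).2 (Or.inr ⟨hcg, hgf⟩)

theorem perimFold_eq (F : PySem.Set (Int × Int × Int × Int)) (hN : F.Nodup) :
    (perimFold F).2 = ((F.filter (endB F)).length : Int) := by
  have h := perim_fold_inv F hN F [] [] 0 rfl (by intro g hg; simp at hg)
    (by intro p hp; simp at hp)
  rw [touch_nil, touch_full] at h
  simpa [perimFold] using h

-- ===== the fence set, characterised =====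
def dirs4 : List (Int × Int) := [(1, 0), (-1, 0), (0, 1), (0, -1)]

def quad (c d : Int × Int) : Int × Int × Int × Int := (c.1, c.2, d.1, d.2)

def FL (v : PySem.Dict (Int × Int) Bool) : List (Int × Int × Int × Int) :=
  v.keys.flatMap (fun c =>
    (dirs4.filter (fun d => !v.contains (c.1 + d.1, c.2 + d.2))).map (quad c))

def sdir (d : Int × Int) : Int × Int := if d.1 ≠ 0 then (0, 1) else (1, 0)

def bpred (v : PySem.Dict (Int × Int) Bool) (c d : Int × Int) : Bool :=
  !v.contains (c.1 + d.1, c.2 + d.2) &&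
    (!v.contains (c.1 + (sdir d).1, c.2 + (sdir d).2) ||
      v.contains (c.1 + (sdir d).1 + d.1, c.2 + (sdir d).2 + d.2))

theorem getNeighbours_eq (x y : Int) :
    getNeighbours x y = dirs4.map (fun d => (x + d.1, y + d.2)) := by
  simp [getNeighbours, dirs4]
  omega

theorem nodup_quad_dirs4 (c : Int × Int) : (dirs4.map (quad c)).Nodup := by
  simp [dirs4, quad, Prod.ext_iff]

theorem inner_fold (v : PySem.Dict (Int × Int) Bool) (c : Int × Int) :
    ∀ (ds : List (Int × Int)) (acc : PySem.Set (Int × Int × Int × Int)),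
    (ds.map (quad c)).Nodup → (∀ d ∈ ds, quad c d ∉ acc) →
    ds.foldl (fun fences d => if v.contains (c.1 + d.1, c.2 + d.2) then fences
        else PySem.Set.add fences (quad c d)) acc
      = acc ++ (ds.filter (fun d => !v.contains (c.1 + d.1, c.2 + d.2))).map (quad c) := by
  intro ds
  induction ds with
  | nil => intro acc _ _; simp
  | cons d ds ih =>
    intro acc hnd hfresh
    simp only [List.foldl_cons]
    by_cases hc : v.contains (c.1 + d.1, c.2 + d.2) = true
    · rw [if_pos hc, ih acc (by simpa using hnd.of_cons) (fun d' hd' => hfresh d' (by simp [hd']))]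
      simp [hc]
    · rw [if_neg hc, PySem.Set.add_of_not_mem (hfresh d (by simp))]
      rw [ih (acc ++ [quad c d]) (by simpa using hnd.of_cons) ?_]
      · simp [hc]
      · intro d' hd'
        rw [List.mem_append]
        rintro (hmem | hmem)
        · exact hfresh d' (by simp [hd']) hmem
        · have : quad c d' = quad c d := by simpa using hmem
          have hne : quad c d ∉ ds.map (quad c) := (List.nodup_cons.1 (by simpa using hnd)).1
          exact hne (this ▸ List.mem_map_of_mem hd')

theorem outer_fold (v : PySem.Dict (Int × Int) Bool) :
    ∀ (S : List (Int × Int)) (acc : PySem.Set (Int × Int × Int × Int)),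
    S.Nodup → (∀ q ∈ acc, ((q.1, q.2.1) : Int × Int) ∉ S) →
    S.foldl (fun fences c =>
        (getNeighbours c.1 c.2).foldl (fun fences n =>
          if v.contains n then fences
          else PySem.Set.add fences (c.1, c.2, n.1 - c.1, n.2 - c.2)) fences) acc
      = acc ++ S.flatMap (fun c =>
          (dirs4.filter (fun d => !v.contains (c.1 + d.1, c.2 + d.2))).map (quad c)) := by
  intro S
  induction S with
  | nil => intro acc _ _; simp
  | cons c S ih =>
    intro acc hnd hfresh
    simp only [List.foldl_cons]
    have hinner : (getNeighbours c.1 c.2).foldl (fun fences n =>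
          if v.contains n then fences
          else PySem.Set.add fences (c.1, c.2, n.1 - c.1, n.2 - c.2)) acc
        = acc ++ (dirs4.filter (fun d => !v.contains (c.1 + d.1, c.2 + d.2))).map (quad c) := by
      rw [getNeighbours_eq, List.foldl_map]
      have hstep : (fun (fences : PySem.Set (Int × Int × Int × Int)) (d : Int × Int) =>
            if v.contains (c.1 + d.1, c.2 + d.2) then fences
            else PySem.Set.add fences (c.1, c.2, (c.1 + d.1) - c.1, (c.2 + d.2) - c.2))
          = (fun fences d => if v.contains (c.1 + d.1, c.2 + d.2) then fences
            else PySem.Set.add fences (quad c d)) := by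
        funext fences d
        simp [quad]
      rw [hstep]
      refine inner_fold v c dirs4 acc (nodup_quad_dirs4 c) ?_
      intro d _ hmem
      have := hfresh (quad c d) hmem
      simp [quad] at this
    rw [hinner, ih _ hnd.of_cons ?_]
    · simp
    · intro q hq
      rcases List.mem_append.1 hq with hq' | hq'
      · intro hmem
        exact hfresh q hq' (List.mem_cons_of_mem _ hmem)
      · obtain ⟨d, _, rfl⟩ := List.mem_map.1 hq'
        intro hmem
        have hcS : c ∈ S := by simpa [quad] using hmem
        exact (List.nodup_cons.1 hnd).1 hcS

theorem buildFences_eq (v : PySem.Dict (Int × Int) Bool) (h : v.keys.Nodup) :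
    buildFences v = FL v := by
  unfold buildFences FL
  rw [outer_fold v v.keys PySem.Set.empty h (by intro q hq; simp [PySem.Set.empty] at hq)]
  simp [PySem.Set.empty]

theorem nodup_buildFences (v : PySem.Dict (Int × Int) Bool) : (buildFences v).Nodup := by
  unfold buildFences
  have hin : ∀ (ns : List (Int × Int)) (a : PySem.Set (Int × Int × Int × Int)) (c : Int × Int),
      a.Nodup → (ns.foldl (fun fences n =>
        if v.contains n then fences
        else PySem.Set.add fences (c.1, c.2, n.1 - c.1, n.2 - c.2)) a).Nodup := by
    intro ns
    induction ns with
    | nil => intro a c ha; exact ha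
    | cons n ns ihn =>
      intro a c ha
      simp only [List.foldl_cons]
      by_cases hc : v.contains n = true
      · rw [if_pos hc]; exact ihn _ _ ha
      · rw [if_neg hc]; exact ihn _ _ (PySem.Set.nodup_add _ _ ha)
  have hout : ∀ (S : List (Int × Int)) (acc : PySem.Set (Int × Int × Int × Int)),
      acc.Nodup → (S.foldl (fun fences c =>
        (getNeighbours c.1 c.2).foldl (fun fences n =>
          if v.contains n then fences
          else PySem.Set.add fences (c.1, c.2, n.1 - c.1, n.2 - c.2)) fences) acc).Nodup := by
    intro S
    induction S with
    | nil => intro acc h; exact h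
    | cons c S ih =>
      intro acc h
      simp only [List.foldl_cons]
      exact ih _ (hin _ _ _ h)
  exact hout _ _ List.nodup_nil

theorem mem_FL (v : PySem.Dict (Int × Int) Bool) (q : Int × Int × Int × Int) :
    q ∈ FL v ↔ v.contains (q.1, q.2.1) = true ∧ q.2.2 ∈ dirs4 ∧
      v.contains (q.1 + q.2.2.1, q.2.1 + q.2.2.2) = false := by
  unfold FL
  rw [List.mem_flatMap]
  constructor
  · rintro ⟨c, hc, hq⟩
    obtain ⟨d, hd, rfl⟩ := List.mem_map.1 hq
    obtain ⟨hd4, hdc⟩ := List.mem_filter.1 hd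
    refine ⟨?_, by simpa [quad] using hd4, ?_⟩
    · have he : (((quad c d).1, (quad c d).2.1) : Int × Int) = c := by simp [quad]
      rw [he]
      exact (PySem.Dict.contains_iff_mem_keys _ _).2 hc
    · simpa [quad] using hdc
  · rintro ⟨h1, h2, h3⟩
    refine ⟨(q.1, q.2.1), (PySem.Dict.contains_iff_mem_keys _ _).1 h1, ?_⟩
    rw [List.mem_map]
    exact ⟨q.2.2, List.mem_filter.2 ⟨h2, by simp [h3]⟩, rfl⟩

theorem pvFoldlExt {α β : Type} (f g : α → β → α) (h : ∀ a b, f a b = g a b) :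
    ∀ (l : List β) (a : α), l.foldl f a = l.foldl g a := by
  intro l
  induction l with
  | nil => intro a; rfl
  | cons b l ih => intro a; simp only [List.foldl_cons, h, ih]

theorem fsucc_quad (c d : Int × Int) :
    fsucc (quad c d) = quad (c.1 + (sdir d).1, c.2 + (sdir d).2) d := by
  simp only [fsucc, shiftK, dirOf, quad, sdir]
  split_ifs <;> simp

-- the corner test of B computes exactly "this fence is the last one of its side"
theorem endB_quad (v : PySem.Dict (Int × Int) Bool) (c d : Int × Int) (hd : d ∈ dirs4) :
    (endB (FL v) (quad c d) && !v.contains (c.1 + d.1, c.2 + d.2)) = bpred v c d := by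
  simp only [bpred]
  by_cases h1 : v.contains (c.1 + d.1, c.2 + d.2) = true
  · simp [h1]
  · have h1' : v.contains (c.1 + d.1, c.2 + d.2) = false := by simpa using h1
    simp only [h1', Bool.not_false, Bool.and_true, Bool.true_and]
    have hiff : quad (c.1 + (sdir d).1, c.2 + (sdir d).2) d ∈ FL v ↔
        (v.contains (c.1 + (sdir d).1, c.2 + (sdir d).2) = true ∧
          v.contains (c.1 + (sdir d).1 + d.1, c.2 + (sdir d).2 + d.2) = false) := by
      rw [mem_FL]
      constructor
      · rintro ⟨a, _, b⟩
        exact ⟨by simpa [quad] using a, by simpa [quad] using b⟩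
      · rintro ⟨a, b⟩
        exact ⟨by simpa [quad] using a, by simpa [quad] using hd, by simpa [quad] using b⟩
    rw [endB, fsucc_quad]
    cases ha : v.contains (c.1 + (sdir d).1, c.2 + (sdir d).2) <;>
      cases hb : v.contains (c.1 + (sdir d).1 + d.1, c.2 + (sdir d).2 + d.2) <;>
        simp [hiff, ha, hb]

theorem countSides_eq (v : PySem.Dict (Int × Int) Bool) (h : v.keys.Nodup) :
    countSides v = (((FL v).filter (endB (FL v))).length : Int) := by
  unfold countSides
  have hstep : ∀ (c : Int × Int) (sides : Int) (d : Int × Int),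
      (if v.contains (c.1 + d.1, c.2 + d.2) = true then sides
       else
        let s : Int × Int := if d.1 ≠ 0 then (0, 1) else (1, 0)
        if (!v.contains (c.1 + s.1, c.2 + s.2) ||
            v.contains (c.1 + s.1 + d.1, c.2 + s.2 + d.2)) = true
        then sides + 1 else sides)
      = if bpred v c d then sides + 1 else sides := by
    intro c sides d
    simp only [bpred, sdir]
    by_cases h1 : v.contains (c.1 + d.1, c.2 + d.2) = true
    · simp [h1]
    · have h1' : v.contains (c.1 + d.1, c.2 + d.2) = false := by simpa using h1
      simp [h1']
  have houter : v.keys.foldl (fun sides c =>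
      (([(1, 0), (-1, 0), (0, 1), (0, -1)] : List (Int × Int)).foldl (fun sides d =>
        if v.contains (c.1 + d.1, c.2 + d.2) then sides
        else
          let s : Int × Int := if d.1 ≠ 0 then (0, 1) else (1, 0)
          if !v.contains (c.1 + s.1, c.2 + s.2) ||
              v.contains (c.1 + s.1 + d.1, c.2 + s.2 + d.2)
          then sides + 1 else sides) sides)) 0
      = v.keys.foldl (fun sides c => sides + ((dirs4.countP (bpred v c) : Nat) : Int)) 0 := by
    apply pvFoldlExt
    intro sides c
    have hfun : (fun (sides : Int) (d : Int × Int) =>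
        if v.contains (c.1 + d.1, c.2 + d.2) then sides
        else
          let s : Int × Int := if d.1 ≠ 0 then (0, 1) else (1, 0)
          if !v.contains (c.1 + s.1, c.2 + s.2) ||
              v.contains (c.1 + s.1 + d.1, c.2 + s.2 + d.2)
          then sides + 1 else sides)
        = (fun sides d => if bpred v c d then sides + 1 else sides) := by
      funext sides d
      exact hstep c sides d
    rw [hfun]
    exact PySem.List.foldl_count_if (bpred v c) dirs4 sides
  rw [houter, PySem.List.foldl_add]
  have hper : ∀ c : Int × Int,
      (((dirs4.filter (fun d => !v.contains (c.1 + d.1, c.2 + d.2))).map (quad c)).filter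
        (endB (FL v))).length = dirs4.countP (bpred v c) := by
    intro c
    rw [List.filter_map, List.length_map, ← List.countP_eq_length_filter, List.countP_filter]
    apply List.countP_congr
    intro d hd
    rw [← endB_quad v c d hd]
    rfl
  have hsum : ∀ S : List (Int × Int),
      (((S.flatMap (fun c => (dirs4.filter (fun d =>
          !v.contains (c.1 + d.1, c.2 + d.2))).map (quad c))).filter (endB (FL v))).length : Int)
        = (S.map (fun c => ((dirs4.countP (bpred v c) : Nat) : Int))).sum := by
    intro S
    induction S with
    | nil => rfl
    | cons c S ih =>
      simp only [List.flatMap_cons, List.filter_append, List.length_append, List.map_cons,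
        List.sum_cons]
      push_cast
      rw [hper c, ih]
  rw [zero_add]
  exact (hsum v.keys).symm

theorem per_region (v : PySem.Dict (Int × Int) Bool) (h : v.keys.Nodup) :
    calculatePerimeterPartTwo v = countSides v := by
  unfold calculatePerimeterPartTwo
  have hnd : (FL v).Nodup := buildFences_eq v h ▸ nodup_buildFences v
  rw [buildFences_eq v h, perimFold_eq _ hnd, ← countSides_eq v h]

theorem floodFillLoop_nodup (grid : List String) (sx sy : Int) :
    ∀ (fuel : Nat) (visited : PySem.Dict (Int × Int) Bool) (Q : List (Int × Int)),
    visited.keys.Nodup → (floodFillLoop grid sx sy visited Q fuel).keys.Nodup := by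
  intro fuel
  induction fuel with
  | zero =>
    intro visited Q h
    cases Q <;> simpa only [floodFillLoop] using h
  | succ fuel ih =>
    intro visited Q h
    cases Q with
    | nil => simpa only [floodFillLoop] using h
    | cons a Q' =>
      simp only [floodFillLoop]
      split
      · exact ih _ _ h
      · exact ih _ _ (PySem.Dict.nodup_keys_insert _ _ _ h)

theorem floodFill_nodup (grid : List String) (sx sy : Int) :
    (floodFill grid sx sy).keys.Nodup := by
  unfold floodFill
  exact floodFillLoop_nodup grid sx sy _ _ _ PySem.Dict.nodup_keys_empty

-- ===== VERDICT (by name: the statement is the Claim_ definition above) =====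
theorem part_two_spec : Claim_equal_part_two := by
  intro input_str _ _
  unfold Spec_part_two
  simp only [part_two, part_two_alt]
  apply congrArg Prod.snd
  apply congrFun
  apply congrFun
  apply congrArg
  funext st x
  apply pvFoldlExt
  intro st' y
  by_cases hc : st'.1.contains (x, y) = true
  · simp only [if_pos hc]
  · simp only [if_neg hc]
    rw [per_region _ (floodFill_nodup _ x y)]
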